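-- pv_equiv track=rewrite | github.com/MTE-CH/TP_COMPILATION_L3 | tp3.py | cleanYourCode
-- ===== SOURCE A (Python) =====
-- def cleanYourCode(text):
--     insideDollar = False
--     temp = ''
--     result = ''
--     for char in text:
--         if char == '$':
--             if insideDollar:
--                 insideDollar = False
--                 temp = ''
--             else:
--                 insideDollar = True
--         elif insideDollar:
--             temp += char
--         else:
--             if char != ' ' and char != '\n':
--                 result += char
--     if insideDollar:
--         result += temp
--     return result
-- ===== SOURCE B (Python) =====
-- def cleanYourCode(text):
--     parts = text.split('$')
--     pieces = []
--     for i, part in enumerate(parts):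
--         if i % 2 == 0:
--             pieces.append(''.join(c for c in part if c != ' ' and c != '\n'))
--         elif i == len(parts) - 1:
--             pieces.append(part)
--     return ''.join(pieces)
-- ===== Notes on version B (the rewrite author's own statement) =====
-- stated objective: alternative
-- what changed: Replaced the character-by-character insideDollar toggle state machine by splitting the text on '$' once and processing whole segments by index parity (even segments stripped of ' ' and ' ', odd ones discarded unless last, i.e. unterminated).
import Mathlib
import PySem

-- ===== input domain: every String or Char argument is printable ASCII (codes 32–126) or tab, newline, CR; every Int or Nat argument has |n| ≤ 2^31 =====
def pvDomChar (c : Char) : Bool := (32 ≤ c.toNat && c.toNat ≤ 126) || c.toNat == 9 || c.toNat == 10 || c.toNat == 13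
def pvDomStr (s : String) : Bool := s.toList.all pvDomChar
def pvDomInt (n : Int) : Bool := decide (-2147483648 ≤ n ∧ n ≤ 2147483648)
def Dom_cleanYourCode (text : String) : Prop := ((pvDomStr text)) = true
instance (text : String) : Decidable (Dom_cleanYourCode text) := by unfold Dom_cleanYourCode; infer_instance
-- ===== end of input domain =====

-- B replaces A's char-by-char inside/outside-dollar state machine by splitting on '$'
-- and processing whole segments by index parity (objective: alternative decomposition).


-- ===== PORT A =====
-- the loop body of A: state = (insideDollar, temp, result)
def cleanYourCodeStep (s : Bool × List Char × List Char) (c : Char) : Bool × List Char × List Char :=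
  if c = '$' then
    (if s.1 then (false, ([], s.2.2)) else (true, (s.2.1, s.2.2)))
  else if s.1 then (true, (s.2.1 ++ [c], s.2.2))
  else if c ≠ ' ' ∧ c ≠ '\n' then (false, (s.2.1, s.2.2 ++ [c]))
  else s

def cleanYourCode (text : String) : String :=
  let st := text.toList.foldl cleanYourCodeStep (false, ([], []))
  String.ofList (if st.1 then st.2.2 ++ st.2.1 else st.2.2)

-- ===== PORT B =====
def cleanYourCode_alt (text : String) : String :=
  let parts := text.toList.splitOn '$'
  let pieces := (PySem.List.enumerate parts 0).foldl
    (fun (acc : List (List Char)) (p : Int × List Char) =>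
      if PySem.Int.mod p.1 2 = 0 then
        acc ++ [p.2.filter (fun c => decide (c ≠ ' ' ∧ c ≠ '\n'))]
      else if p.1 = (parts.length : Int) - 1 then acc ++ [p.2]
      else acc) []
  String.ofList pieces.flatten

-- ===== PRECONDITION & SPEC =====
def Spec_cleanYourCode (text : String) (out : String) : Prop := out = cleanYourCode_alt text
instance (text : String) (out : String) : Decidable (Spec_cleanYourCode text out) := by unfold Spec_cleanYourCode; infer_instance

-- ===== CLAIM (what is proved, stated in full; the proofs are below) =====
def Claim_equal_cleanYourCode : Prop := ∀ (text : String), Dom_cleanYourCode text → Spec_cleanYourCode text (cleanYourCode text)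

-- ===== LEMMAS AND PROOFS =====

-- the even-position segment cleanup
def pvStrip (p : List Char) : List Char := p.filter (fun c => decide (c ≠ ' ' ∧ c ≠ '\n'))

-- what B computes on the remaining segments; the Bool is the parity flag (true = even index)
def pvProc : Bool → List (List Char) → List Char
  | _, [] => []
  | true, [p] => pvStrip p
  | false, [p] => p
  | true, p :: q :: ps => pvStrip p ++ pvProc false (q :: ps)
  | false, _ :: q :: ps => pvProc true (q :: ps)

-- what A's loop yields when currently inside a dollar with accumulated temp t
def pvProcIn (t : List Char) : List (List Char) → List Char
  | [] => t
  | [p] => t ++ p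
  | _ :: q :: ps => pvProc true (q :: ps)

-- A's final read-out of the loop state
def pvFin (s : Bool × List Char × List Char) : List Char :=
  if s.1 then s.2.2 ++ s.2.1 else s.2.2

lemma splitOn_ne_nil (cs : List Char) (a : Char) : cs.splitOn a ≠ [] := by
  induction cs with
  | nil => simp [List.splitOn]
  | cons c cs ih =>
    simp only [List.splitOn, List.splitOnP_cons] at *
    split
    · simp
    · cases h : cs.splitOnP (· == a) with
      | nil => exact absurd h ih
      | cons q qs => simp

lemma splitOn_cons_ne (cs : List Char) (a c : Char) (h : c ≠ a) :
    (c :: cs).splitOn a = (cs.splitOn a).modifyHead (List.cons c) := by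
  simp [List.splitOn, List.splitOnP_cons, h]

lemma splitOn_cons_self (cs : List Char) (a : Char) :
    (a :: cs).splitOn a = [] :: cs.splitOn a := by
  simp [List.splitOn, List.splitOnP_cons]

lemma pvStrip_cons_keep (c : Char) (p : List Char) (h1 : c ≠ ' ') (h2 : c ≠ '\n') :
    pvStrip (c :: p) = c :: pvStrip p := by
  simp [pvStrip, h1, h2]

lemma pvStrip_cons_drop (c : Char) (p : List Char) (h : c = ' ' ∨ c = '\n') :
    pvStrip (c :: p) = pvStrip p := by
  rcases h with h | h <;> simp [pvStrip, h]

lemma foldA (cs : List Char) :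
    (∀ r, pvFin (cs.foldl cleanYourCodeStep (false, ([], r))) = r ++ pvProc true (cs.splitOn '$')) ∧
    (∀ t r, pvFin (cs.foldl cleanYourCodeStep (true, (t, r))) = r ++ pvProcIn t (cs.splitOn '$')) := by
  induction cs with
  | nil =>
    refine ⟨fun r => ?_, fun t r => ?_⟩
    · simp [pvFin, pvProc, pvStrip, List.splitOn]
    · simp [pvFin, pvProcIn, List.splitOn]
  | cons c cs ih =>
    obtain ⟨ihOut, ihIn⟩ := ih
    constructor
    · intro r
      by_cases hc : c = '$'
      · subst hc
        rw [List.foldl_cons, show cleanYourCodeStep (false, ([], r)) '$' = (true, ([], r)) by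
          simp [cleanYourCodeStep], ihIn, splitOn_cons_self]
        cases h : cs.splitOn '$' with
        | nil => exact absurd h (splitOn_ne_nil cs '$')
        | cons q qs => cases qs <;> simp [pvProc, pvProcIn, pvStrip]
      · cases h : cs.splitOn '$' with
        | nil => exact absurd h (splitOn_ne_nil cs '$')
        | cons q qs =>
          rw [splitOn_cons_ne cs '$' c hc, h, List.modifyHead_cons]
          by_cases hk : c ≠ ' ' ∧ c ≠ '\n'
          · rw [List.foldl_cons, show cleanYourCodeStep (false, ([], r)) c = (false, ([], r ++ [c])) by
              simp [cleanYourCodeStep, hc, hk], ihOut, h]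
            cases qs <;> simp [pvProc, pvStrip_cons_keep c q hk.1 hk.2]
          · have hd : c = ' ' ∨ c = '\n' := by
              by_cases h1 : c = ' '
              · exact Or.inl h1
              · exact Or.inr (by rcases not_and_or.mp hk with h2 | h2 <;> simp_all)
            rw [List.foldl_cons, show cleanYourCodeStep (false, ([], r)) c = (false, ([], r)) by
              rcases hd with h1 | h1 <;> simp [cleanYourCodeStep, h1], ihOut, h]
            cases qs <;> simp [pvProc, pvStrip_cons_drop c q hd]
    · intro t r
      by_cases hc : c = '$'
      · subst hc
        rw [List.foldl_cons, show cleanYourCodeStep (true, (t, r)) '$' = (false, ([], r)) by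
          simp [cleanYourCodeStep], ihOut, splitOn_cons_self]
        cases h : cs.splitOn '$' with
        | nil => exact absurd h (splitOn_ne_nil cs '$')
        | cons q qs => cases qs <;> simp [pvProc, pvProcIn, pvStrip]
      · cases h : cs.splitOn '$' with
        | nil => exact absurd h (splitOn_ne_nil cs '$')
        | cons q qs =>
          rw [splitOn_cons_ne cs '$' c hc, h, List.modifyHead_cons,
            List.foldl_cons, show cleanYourCodeStep (true, (t, r)) c = (true, (t ++ [c], r)) by
              simp [cleanYourCodeStep, hc], ihIn, h]
          cases qs <;> simp [pvProcIn]

lemma foldB (n : Nat) (ps : List (List Char)) : ∀ (s : Nat) (acc : List (List Char)),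
    s + ps.length = n →
    ((PySem.List.enumerate ps (s : Int)).foldl
      (fun (acc : List (List Char)) (p : Int × List Char) =>
        if PySem.Int.mod p.1 2 = 0 then
          acc ++ [p.2.filter (fun c => decide (c ≠ ' ' ∧ c ≠ '\n'))]
        else if p.1 = (n : Int) - 1 then acc ++ [p.2]
        else acc) acc).flatten = acc.flatten ++ pvProc (s % 2 == 0) ps := by
  induction ps with
  | nil => intro _ _ _; simp [PySem.List.enumerate_nil, pvProc]
  | cons p ps ih =>
    intro s acc hn
    rw [PySem.List.enumerate_cons, List.foldl_cons, show ((s:Int) + 1) = (((s+1 : Nat)) : Int) by push_cast; ring]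
    have hmod : PySem.Int.mod (s : Int) 2 = (s % 2 : Nat) := by
      rw [PySem.Int.mod_eq_emod_of_pos (by norm_num)]; omega
    by_cases hp : s % 2 = 0
    · rw [if_pos (by rw [hmod, hp]; rfl)]
      cases ps with
      | nil => simp [PySem.List.enumerate_nil, pvProc, pvStrip, hp]
      | cons q qs =>
        rw [ih (s + 1) _ (by simp only [List.length_cons] at hn ⊢; omega)]
        have : ((s + 1) % 2 == 0) = false := by simp; omega
        simp [this, hp, pvProc, pvStrip]
    · rw [if_neg (by rw [hmod]; simp; omega)]
      cases ps with
      | nil =>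
        rw [if_pos (by simp at hn ⊢; omega)]
        have : (s % 2 == 0) = false := by simp [hp]
        simp [PySem.List.enumerate_nil, pvProc, this]
      | cons q qs =>
        rw [if_neg (by simp at hn ⊢; omega), ih (s + 1) _ (by simp only [List.length_cons] at hn ⊢; omega)]
        have h1 : ((s + 1) % 2 == 0) = true := by simp; omega
        have h2 : (s % 2 == 0) = false := by simp [hp]
        simp [h1, h2, pvProc]

-- ===== VERDICT (by name: the statement is the Claim_ definition above) =====
theorem cleanYourCode_spec : Claim_equal_cleanYourCode := by
  intro text _
  unfold Spec_cleanYourCode cleanYourCode cleanYourCode_alt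
  dsimp only
  have hB := foldB (text.toList.splitOn '$').length (text.toList.splitOn '$') 0 [] (by simp)
  simp only [Nat.cast_zero] at hB
  rw [hB]
  have := (foldA text.toList).1 []
  simp only [pvFin] at this
  rw [this]
  simp
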